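-- pv_equiv track=rewrite | github.com/gahjelle/advent_of_code | python/src/2025/01_secret-entrance/aoc202501_plain.py | part2
-- ===== SOURCE A (Python) =====
-- def part2(data: list[int]) -> int:
--     """Solve part 2."""
--     dial = 50
--     count = 0
--     for turn in data:
--         click = 1 if turn > 0 else -1
--         for _ in range(abs(turn)):
--             dial += click
--             count += (dial % 100) == 0
--     return count
-- ===== SOURCE B (Python) =====
-- def part2(data: list[int]) -> int:
--     """Solve part 2: closed-form count of multiples of 100 crossed per turn."""
--     dial = 50
--     count = 0
--     for turn in data:
--         if turn > 0:
--             count += (dial + turn) // 100 - dial // 100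
--         else:
--             count += (dial - 1) // 100 - (dial + turn - 1) // 100
--         dial += turn
--     return count
-- ===== Notes on version B (the rewrite author's own statement) =====
-- stated objective: faster
-- what changed: replaces the per-click inner loop with a closed-form floor-division count of multiples of 100 crossed by each turn
import Mathlib
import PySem

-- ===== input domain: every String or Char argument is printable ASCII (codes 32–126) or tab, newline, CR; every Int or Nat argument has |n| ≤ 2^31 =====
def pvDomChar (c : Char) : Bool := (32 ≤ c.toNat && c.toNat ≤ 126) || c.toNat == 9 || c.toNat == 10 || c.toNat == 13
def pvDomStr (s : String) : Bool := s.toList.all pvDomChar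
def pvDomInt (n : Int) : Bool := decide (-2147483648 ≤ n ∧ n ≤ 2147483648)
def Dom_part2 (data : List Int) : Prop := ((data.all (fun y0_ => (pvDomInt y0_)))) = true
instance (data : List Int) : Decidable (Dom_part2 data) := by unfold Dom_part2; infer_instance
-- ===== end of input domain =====

-- B replaces A's per-click inner loop by a closed-form floor-division count of the
-- multiples of 100 crossed by each turn (objective: faster, asymptotic).

-- ===== PORT A =====
def part2 (data : List Int) : Int :=
  (data.foldl
    (fun (s : Int × Int) (turn : Int) =>
      let click : Int := if turn > 0 then 1 else -1
      (List.range turn.natAbs).foldl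
        (fun (p : Int × Int) _ =>
          (p.1 + click, p.2 + (if PySem.Int.mod (p.1 + click) 100 = 0 then 1 else 0)))
        s)
    (50, 0)).2

-- ===== PORT B =====
def part2_alt (data : List Int) : Int :=
  (data.foldl
    (fun (s : Int × Int) (turn : Int) =>
      if turn > 0 then
        (s.1 + turn, s.2 + (PySem.Int.floordiv (s.1 + turn) 100 - PySem.Int.floordiv s.1 100))
      else
        (s.1 + turn, s.2 + (PySem.Int.floordiv (s.1 - 1) 100 - PySem.Int.floordiv (s.1 + turn - 1) 100)))
    (50, 0)).2

-- ===== PRECONDITION & SPEC =====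
def Spec_part2 (data : List Int) (out : Int) : Prop := out = part2_alt data
instance (data : List Int) (out : Int) : Decidable (Spec_part2 data out) := by unfold Spec_part2; infer_instance

-- ===== CLAIM (what is proved, stated in full; the proofs are below) =====
def Claim_equal_part2 : Prop := ∀ (data : List Int), Dom_part2 data → Spec_part2 data (part2 data)

-- ===== LEMMAS AND PROOFS =====

-- crossing a value x contributes 1 to the floor-division count iff 100 divides x
theorem pv_cross (x : Int) :
    PySem.Int.floordiv x 100 =
      PySem.Int.floordiv (x - 1) 100 + (if PySem.Int.mod x 100 = 0 then 1 else 0) := by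
  rw [PySem.Int.floordiv_eq_ediv_of_pos (by norm_num),
      PySem.Int.floordiv_eq_ediv_of_pos (by norm_num),
      PySem.Int.mod_eq_emod_of_pos (by norm_num)]
  split_ifs with h <;> omega

-- inner loop of A with click = 1, closed form
theorem pv_up (n : ℕ) : ∀ d c : Int,
    (List.range n).foldl
      (fun (p : Int × Int) _ =>
        (p.1 + 1, p.2 + (if PySem.Int.mod (p.1 + 1) 100 = 0 then 1 else 0)))
      (d, c)
    = (d + n, c + (PySem.Int.floordiv (d + n) 100 - PySem.Int.floordiv d 100)) := by
  induction n with
  | zero => intro d c; simp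
  | succ n ih =>
    intro d c
    rw [List.range_succ, List.foldl_append, ih]
    simp only [List.foldl_cons, List.foldl_nil]
    have h := pv_cross (d + n + 1)
    rw [Prod.mk.injEq]
    constructor
    · push_cast; ring
    · push_cast
      rw [show d + ((n : ℤ) + 1) = d + n + 1 from by ring,
          show d + (n : ℤ) + 1 - 1 = d + n from by ring] at *
      split_ifs at h ⊢ <;> omega

-- inner loop of A with click = -1, closed form
theorem pv_down (n : ℕ) : ∀ d c : Int,
    (List.range n).foldl
      (fun (p : Int × Int) _ =>
        (p.1 + -1, p.2 + (if PySem.Int.mod (p.1 + -1) 100 = 0 then 1 else 0)))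
      (d, c)
    = (d - n, c + (PySem.Int.floordiv (d - 1) 100 - PySem.Int.floordiv (d - n - 1) 100)) := by
  induction n with
  | zero => intro d c; simp
  | succ n ih =>
    intro d c
    rw [List.range_succ, List.foldl_append, ih]
    simp only [List.foldl_cons, List.foldl_nil]
    have h := pv_cross (d - n - 1)
    rw [Prod.mk.injEq]
    constructor
    · push_cast; ring
    · push_cast
      rw [show d - ((n : ℤ) + 1) - 1 = d - n - 1 - 1 from by ring,
          show d - (n : ℤ) + -1 = d - n - 1 from by ring] at *
      split_ifs at h ⊢ <;> omega

-- ===== VERDICT (by name: the statement is the Claim_ definition above) =====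
theorem part2_spec : Claim_equal_part2 := by
  intro data _
  unfold Spec_part2 part2 part2_alt
  congr 1
  congr 1
  funext s turn
  by_cases h : turn > 0
  · have hn : (turn.natAbs : Int) = turn := by omega
    simp only [h, if_true]
    rw [show s = (s.1, s.2) from rfl, pv_up, hn]
  · have hn : (turn.natAbs : Int) = -turn := by omega
    simp only [h, if_false]
    rw [show s = (s.1, s.2) from rfl, pv_down, hn]
    rw [Prod.mk.injEq]
    refine ⟨by ring, by ring_nf⟩
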